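-- pv_equiv track=rewrite | github.com/f-maury/MAKAAO_core | scripts/06_make_plots_from_stats.py | descendants
-- ===== SOURCE A (Python) =====
-- from collections import Counter, defaultdict, deque
--
-- def normalize_id(s: str) -> str:
--     if s.startswith("HP:"):
--         return s
--     prefix = "http://purl.obolibrary.org/obo/HP_"
--     if s.startswith(prefix):
--         return "HP:" + s[len(prefix):]
--     return s
--
-- def descendants(root_id: str, children_graph):
--     root_id = normalize_id(root_id)
--     visited = set()
--     queue = deque([root_id])
--
--     while queue:
--         cur = queue.popleft()
--         if cur in visited:
--             continue
--         visited.add(cur)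
--         for ch in children_graph.get(cur, ()):
--             if ch not in visited:
--                 queue.append(ch)
--
--     return visited
-- ===== SOURCE B (Python) =====
-- def normalize_id(s: str) -> str:
--     if s.startswith("HP:"):
--         return s
--     prefix = "http://purl.obolibrary.org/obo/HP_"
--     if s.startswith(prefix):
--         return "HP:" + s[len(prefix):]
--     return s
--
-- def descendants(root_id: str, children_graph):
--     result = set()
--     frontier = [normalize_id(root_id)]
--     while frontier:
--         result.update(frontier)
--         frontier = [ch for n in frontier for ch in children_graph.get(n, ()) if ch not in result]
--     return result
-- ===== Notes on version B (the rewrite author's own statement) =====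
-- stated objective: simpler
-- what changed: Replaced A's per-node deque worklist (pop one node, skip if visited, enqueue its unseen children) by a level-by-level frontier closure: absorb the whole frontier into the result set, then build the next frontier as the not-yet-seen children of the current frontier.
import Mathlib
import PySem

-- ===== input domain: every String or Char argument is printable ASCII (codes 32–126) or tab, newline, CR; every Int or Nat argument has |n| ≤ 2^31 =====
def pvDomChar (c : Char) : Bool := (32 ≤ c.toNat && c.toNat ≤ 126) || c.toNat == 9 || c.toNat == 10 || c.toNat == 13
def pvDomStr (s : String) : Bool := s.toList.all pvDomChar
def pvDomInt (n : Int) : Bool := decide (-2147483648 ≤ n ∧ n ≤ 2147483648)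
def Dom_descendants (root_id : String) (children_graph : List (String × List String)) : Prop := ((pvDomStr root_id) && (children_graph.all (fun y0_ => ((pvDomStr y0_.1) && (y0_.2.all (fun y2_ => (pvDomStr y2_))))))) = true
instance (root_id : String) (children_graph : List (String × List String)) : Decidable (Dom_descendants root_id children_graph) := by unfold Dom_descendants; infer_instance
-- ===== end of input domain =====

-- B replaces A's one-node-at-a-time deque worklist by a level-by-level frontier closure
-- (whole frontier absorbed into the result, next frontier = unseen children of the frontier);
-- objective: simpler (shorter loop body, no per-node dequeue/visited check, no deque).

-- ===== PORT A =====
-- shared helper: Python's normalize_id (used identically by Source A and Source B)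
def normalizeId (s : String) : String :=
  if PySem.Str.startswith s "HP:" then s
  else if PySem.Str.startswith s "http://purl.obolibrary.org/obo/HP_" then
    "HP:" ++ PySem.Str.slice s (some 34) none
  else s

-- shared helper: children_graph.get(n, ()) (first-match association-list lookup)
def pvChild (g : List (String × List String)) (n : String) : List String :=
  PySem.Dict.getD (PySem.Dict.mk g) n []

-- A's while-loop over (visited, deque); fuel only makes the recursion structural
def loopA (g : List (String × List String)) : Nat → List String → List String → List String
  | 0, visited, _ => visited
  | _ + 1, visited, [] => visited
  | fuel + 1, visited, cur :: rest =>
    if cur ∈ visited then loopA g fuel visited rest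
    else
      let visited' := PySem.Set.add visited cur
      loopA g fuel visited' (rest ++ (pvChild g cur).filter (fun ch => ch ∉ visited'))

def descendants (root_id : String) (children_graph : List (String × List String)) : List String :=
  let r := normalizeId root_id
  let nodes := r :: children_graph.flatMap (fun p => p.1 :: p.2)
  let cost := (children_graph.map (fun p => p.2.length)).sum
  loopA children_graph (1 + (cost + 1) * nodes.length) [] [r]

-- ===== PORT B =====
-- B's while-loop over (result, frontier); one recursion step = one whole level
def loopB (g : List (String × List String)) : Nat → List String → List String → List String
  | 0, result, _ => result
  | _ + 1, result, [] => result
  | fuel + 1, result, x :: xs =>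
    let result' := PySem.Set.update result (x :: xs)
    loopB g fuel result'
      ((x :: xs).flatMap (fun n => (pvChild g n).filter (fun ch => ch ∉ result')))

def descendants_alt (root_id : String) (children_graph : List (String × List String)) : List String :=
  let nodes := normalizeId root_id :: children_graph.flatMap (fun p => p.1 :: p.2)
  loopB children_graph (nodes.length + 1) [] [normalizeId root_id]

-- ===== PRECONDITION & SPEC =====
def Spec_descendants (root_id : String) (children_graph : List (String × List String)) (out : List String) : Prop := out = descendants_alt root_id children_graph
instance (root_id : String) (children_graph : List (String × List String)) (out : List String) : Decidable (Spec_descendants root_id children_graph out) := by unfold Spec_descendants; infer_instance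

-- ===== CLAIM (what is proved, stated in full; the proofs are below) =====
def Claim_equal_descendants : Prop := ∀ (root_id : String) (children_graph : List (String × List String)), Dom_descendants root_id children_graph → Spec_descendants root_id children_graph (descendants root_id children_graph)

-- ===== LEMMAS AND PROOFS =====

-- first occurrences of l that are not in v (what a fold of Set.add appends)
def pvReduce (v : List String) : List String → List String
  | [] => []
  | x :: l => if x ∈ v then pvReduce v l else x :: pvReduce (v ++ [x]) l

-- the children A enqueues while consuming a queue segment, with A's progressive filter
def pvKids (g : List (String × List String)) (v : List String) : List String → List String
  | [] => []
  | x :: q =>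
    if x ∈ v then pvKids g v q
    else ((pvChild g x).filter (fun ch => ch ∉ v ++ [x])) ++ pvKids g (v ++ [x]) q

theorem pv_add_spec (v : List String) (x : String) :
    PySem.Set.add v x = if x ∈ v then v else v ++ [x] := by
  simp [PySem.Set.add, PySem.Set.contains]

theorem pv_foldAdd (l v : List String) :
    l.foldl PySem.Set.add v = v ++ pvReduce v l := by
  induction l generalizing v with
  | nil => simp [pvReduce]
  | cons x l ih =>
    simp only [List.foldl_cons, pvReduce, pv_add_spec]
    by_cases hx : x ∈ v
    · simp [hx, ih]
    · simp [hx, ih (v ++ [x])]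

theorem pv_redApp (l1 l2 v : List String) :
    pvReduce v (l1 ++ l2) = pvReduce v l1 ++ pvReduce (v ++ pvReduce v l1) l2 := by
  induction l1 generalizing v with
  | nil => simp [pvReduce]
  | cons x l1 ih =>
    by_cases hx : x ∈ v
    · simp only [List.cons_append, pvReduce, if_pos hx, ih]
    · simp only [List.cons_append, pvReduce, if_neg hx, ih (v ++ [x]), List.cons_append,
        List.append_assoc, List.nil_append]

theorem pv_redNil {l v : List String} (h : ∀ c ∈ l, c ∈ v) : pvReduce v l = [] := by
  induction l with
  | nil => rfl
  | cons x l ih =>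
    have hx : x ∈ v := h x (by simp)
    simp only [pvReduce, if_pos hx]
    exact ih (fun c hc => h c (by simp [hc]))

theorem pv_redSub {l v : List String} {c : String} (hc : c ∈ l) : c ∈ v ++ pvReduce v l := by
  induction l generalizing v with
  | nil => cases hc
  | cons x l ih =>
    by_cases hx : x ∈ v
    · simp only [pvReduce, if_pos hx]
      rcases List.mem_cons.1 hc with rfl | hc'
      · exact List.mem_append_left _ hx
      · exact ih hc'
    · simp only [pvReduce, if_neg hx]
      rcases List.mem_cons.1 hc with rfl | hc'
      · simp
      · have := ih (v := v ++ [x]) hc'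
        simp only [List.mem_append, List.mem_cons] at this ⊢
        tauto

theorem pv_redMem {l v : List String} {x : String} (hx : x ∈ pvReduce v l) : x ∈ l ∧ x ∉ v := by
  induction l generalizing v with
  | nil => cases hx
  | cons y l ih =>
    by_cases hy : y ∈ v
    · simp only [pvReduce, if_pos hy] at hx
      have := ih hx
      exact ⟨List.mem_cons_of_mem _ this.1, this.2⟩
    · simp only [pvReduce, if_neg hy, List.mem_cons] at hx
      rcases hx with rfl | hx'
      · exact ⟨List.mem_cons_self, hy⟩
      · have := ih hx'
        refine ⟨List.mem_cons_of_mem _ this.1, fun hv => this.2 ?_⟩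
        simp [hv]

theorem pv_redNodup (l v : List String) : (pvReduce v l).Nodup := by
  induction l generalizing v with
  | nil => exact List.nodup_nil
  | cons x l ih =>
    by_cases hx : x ∈ v
    · simpa only [pvReduce, if_pos hx] using ih v
    · simp only [pvReduce, if_neg hx, List.nodup_cons]
      refine ⟨fun hmem => ?_, ih (v ++ [x])⟩
      have := (pv_redMem hmem).2
      simp at this
  

theorem pv_redFilter {l v : List String} (p : String → Bool)
    (h : ∀ c ∈ l, p c = false → c ∈ v) :
    pvReduce v (l.filter p) = pvReduce v l := by
  induction l generalizing v with
  | nil => rfl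
  | cons c l ih =>
    by_cases hp : p c
    · simp only [List.filter_cons, hp, if_pos]
      by_cases hc : c ∈ v
      · simp only [pvReduce, if_pos hc]
        exact ih (fun d hd hpd => h d (by simp [hd]) hpd)
      · simp only [pvReduce, if_neg hc]
        rw [ih (fun d hd hpd => by
          have := h d (by simp [hd]) hpd
          simp [this])]
    · have hc : c ∈ v := h c (by simp) (by simpa using hp)
      simp only [List.filter_cons, pvReduce, if_pos hc]
      have hpf : (p c = true) = False := by simp [hp]
      simp only [hpf, if_false]
      exact ih (fun d hd hpd => h d (by simp [hd]) hpd)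

theorem pv_childU {g : List (String × List String)} {n c : String}
    (h : c ∈ pvChild g n) : c ∈ g.flatMap (fun p => p.1 :: p.2) := by
  induction g with
  | nil =>
    simp [pvChild, PySem.Dict.getD, PySem.Dict.get?] at h
  | cons p g ih =>
    obtain ⟨k, vs⟩ := p
    by_cases hk : k == n
    · have : pvChild ((k, vs) :: g) n = vs := by
        simp [pvChild, PySem.Dict.getD, PySem.Dict.get?_mk_cons, hk]
      rw [this] at h
      simp [h]
    · have : pvChild ((k, vs) :: g) n = pvChild g n := by
        simp [pvChild, PySem.Dict.getD, PySem.Dict.get?_mk_cons, hk]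
      rw [this] at h
      have := ih h
      simp only [List.flatMap_cons, List.mem_append]
      exact Or.inr this

theorem pv_childLen (g : List (String × List String)) (n : String) :
    (pvChild g n).length ≤ (g.map (fun p => p.2.length)).sum := by
  induction g with
  | nil =>
    simp [pvChild, PySem.Dict.getD, PySem.Dict.get?]
  | cons p g ih =>
    obtain ⟨k, vs⟩ := p
    by_cases hk : k == n
    · have : pvChild ((k, vs) :: g) n = vs := by
        simp [pvChild, PySem.Dict.getD, PySem.Dict.get?_mk_cons, hk]
      rw [this]
      simp only [List.map_cons, List.sum_cons]
      omega
    · have : pvChild ((k, vs) :: g) n = pvChild g n := by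
        simp [pvChild, PySem.Dict.getD, PySem.Dict.get?_mk_cons, hk]
      rw [this]
      simp only [List.map_cons, List.sum_cons]
      have := ih
      omega

theorem pv_kidsLen (g : List (String × List String)) {C : Nat}
    (hC : ∀ n, (pvChild g n).length ≤ C) (q v : List String) :
    (pvKids g v q).length ≤ C * (pvReduce v q).length := by
  induction q generalizing v with
  | nil => simp [pvKids, pvReduce]
  | cons x q ih =>
    by_cases hx : x ∈ v
    · simp only [pvKids, pvReduce, if_pos hx]
      exact ih v
    · simp only [pvKids, pvReduce, if_neg hx, List.length_append, List.length_cons]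
      have h1 : ((pvChild g x).filter (fun ch => ch ∉ v ++ [x])).length ≤ C :=
        le_trans (List.length_filter_le _ _) (hC x)
      have h2 := ih (v ++ [x])
      have h3 : C * ((pvReduce (v ++ [x]) q).length + 1)
          = C * (pvReduce (v ++ [x]) q).length + C := by ring
      omega

theorem pv_kidsNil {g : List (String × List String)} {q v : List String}
    (h : ∀ x ∈ q, x ∈ v) : pvKids g v q = [] := by
  induction q with
  | nil => rfl
  | cons x q ih =>
    have hx : x ∈ v := h x (by simp)
    simp only [pvKids, if_pos hx]
    exact ih (fun y hy => h y (by simp [hy]))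

theorem pv_kidsSub {g : List (String × List String)} {q v : List String} {c : String}
    (h : c ∈ pvKids g v q) : ∃ n, c ∈ pvChild g n := by
  induction q generalizing v with
  | nil => cases h
  | cons x q ih =>
    by_cases hx : x ∈ v
    · simp only [pvKids, if_pos hx] at h
      exact ih h
    · simp only [pvKids, if_neg hx, List.mem_append] at h
      rcases h with h' | h'
      · exact ⟨x, List.mem_of_mem_filter h'⟩
      · exact ih h'

-- A consumes one whole queue segment: pops its elements, accumulates their unseen children
theorem pv_alevel (g : List (String × List String)) (q : List String) :
    ∀ (v acc : List String) (f : Nat),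
    loopA g (q.length + f) v (q ++ acc) = loopA g f (q.foldl PySem.Set.add v) (acc ++ pvKids g v q) := by
  induction q with
  | nil => intro v acc f; simp [pvKids]
  | cons x q ih =>
    intro v acc f
    have hlen : (x :: q).length + f = (q.length + f) + 1 := by simp; omega
    rw [hlen]
    by_cases hx : x ∈ v
    · show (if x ∈ v then loopA g (q.length + f) v (q ++ acc)
        else _) = _
      rw [if_pos hx, ih v acc f]
      simp [pvKids, hx]
    · show (if x ∈ v then _
        else loopA g (q.length + f) (PySem.Set.add v x)
          ((q ++ acc) ++ (pvChild g x).filter (fun ch => ch ∉ PySem.Set.add v x))) = _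
      rw [if_neg hx]
      simp only [pv_add_spec, if_neg hx]
      rw [List.append_assoc, ih (v ++ [x]) (acc ++ (pvChild g x).filter (fun ch => ch ∉ v ++ [x])) f]
      simp only [List.foldl_cons, pv_add_spec, if_neg hx, pvKids, List.append_assoc]

theorem pv_alevel' (g : List (String × List String)) (q v : List String) (f : Nat) :
    loopA g (q.length + f) v q = loopA g f (q.foldl PySem.Set.add v) (pvKids g v q) := by
  have h := pv_alevel g q v [] f
  simpa using h

-- A's progressively filtered children reduce like the unfiltered children of the canonical level
theorem pv_kidsCanon (g : List (String × List String)) (q : List String) :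
    ∀ (v s : List String), (∀ c ∈ v ++ pvReduce v q, c ∈ s) →
    pvReduce s (pvKids g v q) = pvReduce s ((pvReduce v q).flatMap (pvChild g)) := by
  induction q with
  | nil => intro v s h; rfl
  | cons x q ih =>
    intro v s h
    by_cases hx : x ∈ v
    · simp only [pvKids, if_pos hx]
      rw [ih v s]
      · simp [pvReduce, if_pos hx]
      · intro c hc
        apply h
        simpa [pvReduce, if_pos hx] using hc
    · have hred : pvReduce v (x :: q) = x :: pvReduce (v ++ [x]) q := by
        simp [pvReduce, if_neg hx]
      have hxs : x ∈ s := h x (by rw [hred]; simp)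
      simp only [pvKids, if_neg hx, hred, List.flatMap_cons]
      rw [pv_redApp, pv_redApp]
      have hfil : pvReduce s ((pvChild g x).filter (fun ch => ch ∉ v ++ [x]))
          = pvReduce s (pvChild g x) := by
        apply pv_redFilter
        intro c hc hpc
        have hpc' : c ∉ v → c = x := by simpa using hpc
        by_cases hcv : c ∈ v
        · exact h c (List.mem_append_left _ hcv)
        · rw [hpc' hcv]; exact hxs
      rw [hfil]
      congr 1
      apply ih
      intro c hc
      rcases List.mem_append.1 hc with h' | h'
      · rcases List.mem_append.1 h' with h'' | h''
        · exact List.mem_append_left _ (h c (List.mem_append_left _ h''))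
        · simp at h''; subst h''; exact List.mem_append_left _ hxs
      · exact List.mem_append_left _ (h c (by rw [hred]; exact List.mem_append_right _ (by simp [h'])))

-- dropping B's membership filter does not change the reduction
theorem pv_filtFlat (g : List (String × List String)) (l : List String) :
    ∀ (s b : List String), (∀ c ∈ s, c ∈ b) →
    pvReduce b (l.flatMap (fun n => (pvChild g n).filter (fun ch => ch ∉ s))) =
      pvReduce b (l.flatMap (pvChild g)) := by
  induction l with
  | nil => intro s b h; rfl
  | cons n l ih =>
    intro s b h
    simp only [List.flatMap_cons]
    rw [pv_redApp, pv_redApp]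
    have hfil : pvReduce b ((pvChild g n).filter (fun ch => ch ∉ s)) = pvReduce b (pvChild g n) := by
      apply pv_redFilter
      intro c hc hpc
      exact h c (by simpa using hpc)
    rw [hfil]
    congr 1
    apply ih
    intro c hc
    exact List.mem_append_left _ (h c hc)

-- duplicate frontier entries contribute nothing to the reduction
theorem pv_par (g : List (String × List String)) (fr : List String) :
    ∀ (v b : List String), (∀ n ∈ fr, n ∈ v → ∀ c ∈ pvChild g n, c ∈ b) →
    pvReduce b (fr.flatMap (pvChild g)) = pvReduce b ((pvReduce v fr).flatMap (pvChild g)) := by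
  induction fr with
  | nil => intro v b h; rfl
  | cons x fr ih =>
    intro v b h
    by_cases hx : x ∈ v
    · have hred : pvReduce v (x :: fr) = pvReduce v fr := by simp [pvReduce, if_pos hx]
      have hnil : pvReduce b (pvChild g x) = [] :=
        pv_redNil (fun c hc => h x (by simp) hx c hc)
      simp only [List.flatMap_cons]
      rw [pv_redApp, hnil, hred]
      simp only [List.nil_append, List.append_nil]
      apply ih
      intro n hn hnv c hc
      exact h n (by simp [hn]) hnv c hc
    · have hred : pvReduce v (x :: fr) = x :: pvReduce (v ++ [x]) fr := by
        simp [pvReduce, if_neg hx]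
      simp only [List.flatMap_cons, hred]
      rw [pv_redApp, pv_redApp]
      congr 1
      apply ih
      intro n hn hnv c hc
      rcases List.mem_append.1 hnv with h' | h'
      · exact List.mem_append_left _ (h n (by simp [hn]) h' c hc)
      · simp at h'; subst h'
        exact pv_redSub hc

theorem pv_cardDrop {U v q : List String} (hq : ∀ x ∈ q, x ∈ U) :
    (U.toFinset \ (v ++ pvReduce v q).toFinset).card + (pvReduce v q).length
      = (U.toFinset \ v.toFinset).card := by
  have hnd : (pvReduce v q).Nodup := pv_redNodup q v
  have hsub : (pvReduce v q).toFinset ⊆ U.toFinset \ v.toFinset := by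
      intro x hx
      rw [List.mem_toFinset] at hx
      have := pv_redMem hx
      rw [Finset.mem_sdiff, List.mem_toFinset, List.mem_toFinset]
      exact ⟨hq x this.1, this.2⟩
  have heq : U.toFinset \ (v ++ pvReduce v q).toFinset
        = (U.toFinset \ v.toFinset) \ (pvReduce v q).toFinset := by
      ext x
      simp only [Finset.mem_sdiff, List.mem_toFinset, List.mem_append]
      tauto
  rw [heq, Finset.card_sdiff, Finset.inter_eq_left.2 hsub, List.toFinset_card_of_nodup hnd]
  have hle := Finset.card_le_card hsub
  rw [List.toFinset_card_of_nodup hnd] at hle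
  omega

theorem pv_loopA_nil (g : List (String × List String)) (f : Nat) (v : List String) :
    loopA g f v [] = v := by
  cases f <;> rfl

-- the main simulation: A's worklist loop equals B's level loop
theorem pv_main (g : List (String × List String)) (U : List String) (C : Nat)
    (hC : ∀ n, (pvChild g n).length ≤ C)
    (hU : ∀ n c, c ∈ pvChild g n → c ∈ U) :
    ∀ (fB : Nat) (v q fr : List String) (fA : Nat),
    pvReduce v q = pvReduce v fr →
    (∀ x ∈ fr, x ∉ v) →
    (∀ x ∈ q, x ∈ U) →
    q.length + (C + 1) * (U.toFinset \ v.toFinset).card ≤ fA →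
    (U.toFinset \ v.toFinset).card < fB →
    loopA g fA v q = loopB g fB v fr := by
  intro fB
  induction fB with
  | zero => intro v q fr fA _ _ _ _ h5; exact absurd h5 (Nat.not_lt_zero _)
  | succ fb ih =>
    intro v q fr fA hred hdisj hqU hfA hfB
    cases fr with
    | nil =>
      have hq : ∀ x ∈ q, x ∈ v := by
        intro x hx
        by_contra hxv
        have hmem := pv_redSub (v := v) hx
        rw [hred] at hmem
        simp only [pvReduce, List.append_nil] at hmem
        exact hxv hmem
      have hfa2 : q.length ≤ fA := by omega
      have hsplit : fA = q.length + (fA - q.length) := by omega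
      rw [hsplit, pv_alevel', pv_kidsNil hq, pv_foldAdd, pv_redNil hq]
      simp only [List.append_nil]
      rw [pv_loopA_nil]
      rfl
    | cons x xs =>
      have hxv : x ∉ v := hdisj x (by simp)
      have hredfr : pvReduce v (x :: xs) = x :: pvReduce (v ++ [x]) xs := by
        simp [pvReduce, if_neg hxv]
      have hrednil : pvReduce v q ≠ [] := by rw [hred, hredfr]; simp
      have hupd : PySem.Set.update v (x :: xs) = v ++ pvReduce v q := by
        show (x :: xs).foldl PySem.Set.add v = _
        rw [pv_foldAdd, ← hred]
      have hB : loopB g (fb + 1) v (x :: xs) = loopB g fb (PySem.Set.update v (x :: xs))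
          ((x :: xs).flatMap (fun n => (pvChild g n).filter
            (fun ch => ch ∉ PySem.Set.update v (x :: xs)))) := rfl
      rw [hB]
      simp only [hupd]
      have hfa2 : q.length ≤ fA := by omega
      have hsplit : fA = q.length + (fA - q.length) := by omega
      rw [hsplit, pv_alevel', pv_foldAdd]
      -- facts for the inductive step
      have hcard := pv_cardDrop (v := v) (U := U) hqU
      have hr1 : 1 ≤ (pvReduce v q).length := by
        cases hh : pvReduce v q with
        | nil => exact absurd hh hrednil
        | cons a l => simp
      have hK := pv_kidsLen g hC q v
      apply ih
      · -- the reductions of the two next worklists agree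
        rw [pv_kidsCanon g q v (v ++ pvReduce v q) (fun c hc => hc)]
        rw [pv_filtFlat g (x :: xs) (v ++ pvReduce v q) (v ++ pvReduce v q) (fun c hc => hc)]
        rw [pv_par g (x :: xs) v (v ++ pvReduce v q)
          (fun n hn hnv => absurd hnv (hdisj n hn))]
        rw [← hred]
      · intro y hy
        simp only [List.mem_flatMap, List.mem_filter] at hy
        obtain ⟨n, _, _, hy2⟩ := hy
        simpa using hy2
      · intro y hy
        obtain ⟨n, hn⟩ := pv_kidsSub hy
        exact hU n y hn
      · have e1 : (C + 1) * (U.toFinset \ v.toFinset).card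
            = (C + 1) * (U.toFinset \ (v ++ pvReduce v q).toFinset).card
              + (C + 1) * (pvReduce v q).length := by
          rw [← hcard]; ring
        have e2 : (C + 1) * (pvReduce v q).length
            = C * (pvReduce v q).length + (pvReduce v q).length := by ring
        omega
      · omega

-- ===== VERDICT (by name: the statement is the Claim_ definition above) =====
theorem descendants_spec : Claim_equal_descendants := by
  intro root_id children_graph _
  show descendants root_id children_graph = descendants_alt root_id children_graph
  change loopA children_graph
      (1 + ((children_graph.map (fun p => p.2.length)).sum + 1)
        * (normalizeId root_id :: children_graph.flatMap (fun p => p.1 :: p.2)).length)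
      [] [normalizeId root_id]
    = loopB children_graph
      ((normalizeId root_id :: children_graph.flatMap (fun p => p.1 :: p.2)).length + 1)
      [] [normalizeId root_id]
  set U := normalizeId root_id :: children_graph.flatMap (fun p => p.1 :: p.2) with hU
  set C := (children_graph.map (fun p => p.2.length)).sum with hC
  have hcard : (U.toFinset \ ([] : List String).toFinset).card ≤ U.length := by
    simp only [List.toFinset_nil, Finset.sdiff_empty]
    exact List.toFinset_card_le U
  apply pv_main children_graph U C
  · intro n; exact pv_childLen children_graph n
  · intro n c hc
    exact List.mem_cons_of_mem _ (pv_childU hc)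
  · rfl
  · simp
  · intro y hy
    simp only [List.mem_singleton] at hy
    subst hy
    exact List.mem_cons_self
  · have := Nat.mul_le_mul_left (C + 1) hcard
    simp only [List.length_cons, List.length_nil]
    omega
  · omega
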